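-- pv_equiv track=rewrite | github.com/ksayee/programming_assignments | python/CodingExercises/LeetCode1664.py | LeetCode1664
-- ===== SOURCE A (Python) =====
-- def Validate(tmp):
--
--     even_sum=0
--     odd_sum=0
--
--     for i in range(0,len(tmp)):
--         if i%2==0:
--             even_sum=even_sum+tmp[i]
--         else:
--             odd_sum=odd_sum+tmp[i]
--
--     if even_sum==odd_sum:
--         return True
--     else:
--         return False
--
-- def LeetCode1664(nums):
--
--     cnt =0
--     for i in range(0,len(nums)):
--         tmp= nums[:i]+nums[i+1:]
--         flg = Validate(tmp)
--         if flg is True: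
--             cnt = cnt+1
--     return cnt
-- ===== SOURCE B (Python) =====
-- def LeetCode1664(nums):
--     sufE = 0
--     sufO = 0
--     for i, x in enumerate(nums):
--         if i % 2 == 0:
--             sufE += x
--         else:
--             sufO += x
--     preE = preO = 0
--     cnt = 0
--     for i, x in enumerate(nums):
--         if i % 2 == 0:
--             sufE -= x
--         else:
--             sufO -= x
--         if preE + sufO == preO + sufE:
--             cnt += 1
--         if i % 2 == 0:
--             preE += x
--         else:
--             preO += x
--     return cnt
-- ===== Notes on version B (the rewrite author's own statement) =====
-- stated objective: faster
-- what changed: A rebuilds the list with slicing and rescans it for every index (O(n^2)); B makes one pass maintaining running prefix and suffix even/odd-position sums and does an O(1) parity-swap balance check per index.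
import Mathlib
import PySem

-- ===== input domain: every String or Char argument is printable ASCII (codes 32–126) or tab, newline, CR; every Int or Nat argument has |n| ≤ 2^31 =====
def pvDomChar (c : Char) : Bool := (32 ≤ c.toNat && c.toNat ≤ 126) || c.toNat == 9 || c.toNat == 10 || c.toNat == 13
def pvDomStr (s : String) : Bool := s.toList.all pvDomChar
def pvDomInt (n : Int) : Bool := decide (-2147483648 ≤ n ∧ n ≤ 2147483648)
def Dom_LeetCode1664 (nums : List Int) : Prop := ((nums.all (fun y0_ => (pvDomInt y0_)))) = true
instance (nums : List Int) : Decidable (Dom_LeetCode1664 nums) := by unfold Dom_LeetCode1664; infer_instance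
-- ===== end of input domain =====

-- B replaces A's per-index list-slicing rebuild (O(n^2)) by one pass with running
-- prefix/suffix even/odd sums (O(n)); objective: faster (asymptotic).

-- ===== PORT A =====
-- helper Validate: loop over indices of tmp accumulating even_sum/odd_sum
def Validate (tmp : List Int) : Bool :=
  let s := (PySem.List.pyRange 0 (tmp.length : Int) 1).foldl
    (fun (s : Int × Int) i =>
      if PySem.Int.mod i 2 == 0 then (s.1 + PySem.List.pyGetD tmp i 0, s.2)
      else (s.1, s.2 + PySem.List.pyGetD tmp i 0)) (0, 0)
  s.1 == s.2

-- body of A's main loop: tmp = nums[:i] + nums[i+1:]; count if Validate(tmp)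
def aStep (nums : List Int) (cnt : Int) (i : Int) : Int :=
  let tmp := PySem.List.slice nums none (some i) ++ PySem.List.slice nums (some (i + 1)) none
  if Validate tmp then cnt + 1 else cnt

def LeetCode1664 (nums : List Int) : Int :=
  (PySem.List.pyRange 0 (nums.length : Int) 1).foldl (aStep nums) 0

-- ===== PORT B =====
-- body of Source B's first loop: total even/odd-position sums
def bTot (s : Int × Int) (p : Int × Int) : Int × Int :=
  if PySem.Int.mod p.1 2 == 0 then (s.1 + p.2, s.2) else (s.1, s.2 + p.2)

-- body of Source B's second loop: state (preE, preO, sufE, sufO, cnt)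
def bStep (st : Int × Int × Int × Int × Int) (p : Int × Int) : Int × Int × Int × Int × Int :=
  let pe := st.1; let po := st.2.1
  let sE := st.2.2.1; let sO := st.2.2.2.1; let cnt := st.2.2.2.2
  let sE' := if PySem.Int.mod p.1 2 == 0 then sE - p.2 else sE
  let sO' := if PySem.Int.mod p.1 2 == 0 then sO else sO - p.2
  let cnt' := if pe + sO' == po + sE' then cnt + 1 else cnt
  if PySem.Int.mod p.1 2 == 0 then (pe + p.2, po, sE', sO', cnt')
  else (pe, po + p.2, sE', sO', cnt')

def LeetCode1664_alt (nums : List Int) : Int :=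
  let tot := (PySem.List.enumerate nums 0).foldl bTot (0, 0)
  let st := (PySem.List.enumerate nums 0).foldl bStep (0, 0, tot.1, tot.2, 0)
  st.2.2.2.2

-- ===== PRECONDITION & SPEC =====
def Spec_LeetCode1664 (nums : List Int) (out : Int) : Prop := out = LeetCode1664_alt nums
instance (nums : List Int) (out : Int) : Decidable (Spec_LeetCode1664 nums out) := by unfold Spec_LeetCode1664; infer_instance

-- ===== CLAIM (what is proved, stated in full; the proofs are below) =====
def Claim_equal_LeetCode1664 : Prop := ∀ (nums : List Int), Dom_LeetCode1664 nums → Spec_LeetCode1664 nums (LeetCode1664 nums)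

-- ===== LEMMAS AND PROOFS =====

-- (even-position sum, odd-position sum) of a list
def eo : List Int → Int × Int
  | [] => (0, 0)
  | x :: l => (x + (eo l).2, (eo l).1)

-- reference count: walk the list keeping prefix even/odd sums and a parity flag
def go : List Int → Int → Int → Bool → Int
  | [], _, _, _ => 0
  | x :: l, pe, po, ev =>
    (if (if ev then pe + (eo l).1 = po + (eo l).2 else pe + (eo l).2 = po + (eo l).1)
      then (1 : Int) else 0)
    + (if ev then go l (pe + x) po false else go l pe (po + x) true)

lemma pmod (s : Int) : PySem.Int.mod s 2 = s % 2 :=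
  PySem.Int.mod_eq_emod_of_pos (by norm_num)

lemma tot_loop (l : List Int) : ∀ (s pe po : Int),
    (PySem.List.enumerate l s).foldl bTot (pe, po)
    = (if s % 2 = 0 then (pe + (eo l).1, po + (eo l).2)
       else (pe + (eo l).2, po + (eo l).1)) := by
  induction l with
  | nil => intro s pe po; simp [PySem.List.enumerate_nil, eo]
  | cons x l ih =>
    intro s pe po
    rw [PySem.List.enumerate_cons, List.foldl_cons]
    have hpar : (s + 1) % 2 = 0 ↔ ¬ s % 2 = 0 := by omega
    by_cases h : s % 2 = 0 <;>
      simp [bTot, h, hpar, ih, eo, Prod.ext_iff] <;> ring_nf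

lemma validate_eq (tmp : List Int) :
    Validate tmp = decide ((eo tmp).1 = (eo tmp).2) := by
  unfold Validate
  have h : (PySem.List.pyRange 0 (tmp.length : Int) 1).foldl
      (fun (s : Int × Int) i =>
        if PySem.Int.mod i 2 == 0 then (s.1 + PySem.List.pyGetD tmp i 0, s.2)
        else (s.1, s.2 + PySem.List.pyGetD tmp i 0)) (0, 0)
      = (PySem.List.enumerate tmp 0).foldl bTot (0, 0) := by
    rw [PySem.List.enumerate_eq_map_pyRange (d := 0), List.foldl_map]
    rfl
  rw [h, tot_loop]
  by_cases hh : (eo tmp).1 = (eo tmp).2 <;> simp [hh]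

lemma eo_append (pre l : List Int) :
    eo (pre ++ l)
    = (if pre.length % 2 = 0
       then ((eo pre).1 + (eo l).1, (eo pre).2 + (eo l).2)
       else ((eo pre).1 + (eo l).2, (eo pre).2 + (eo l).1)) := by
  induction pre with
  | nil => simp [eo]
  | cons x pre ih =>
    have hpar : (pre.length + 1) % 2 = 0 ↔ ¬ pre.length % 2 = 0 := by omega
    by_cases h : pre.length % 2 = 0 <;>
      simp [eo, ih, h, hpar, Prod.ext_iff] <;> ring

lemma A_loop (l : List Int) : ∀ (pre : List Int) (cnt : Int),
    (PySem.List.pyRange (pre.length : Int) ((pre.length : Int) + (l.length : Int)) 1).foldl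
      (aStep (pre ++ l)) cnt
    = cnt + go l (eo pre).1 (eo pre).2 (decide (pre.length % 2 = 0)) := by
  induction l with
  | nil =>
    intro pre cnt
    rw [PySem.List.pyRange_one_eq_nil (by simp)]
    simp [go]
  | cons x l ih =>
    intro pre cnt
    rw [PySem.List.pyRange_one_cons (by push_cast [List.length_cons]; omega), List.foldl_cons]
    have htmp : PySem.List.slice (pre ++ x :: l) none (some (pre.length : Int)) ++
        PySem.List.slice (pre ++ x :: l) (some ((pre.length : Int) + 1)) none = pre ++ l := by
      rw [PySem.List.slice_to_natCast,
        show ((pre.length : Int) + 1) = ((pre.length + 1 : Nat) : Int) by push_cast; ring,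
        PySem.List.slice_from_natCast, List.take_left]
      congr 1
      rw [show pre ++ x :: l = (pre ++ [x]) ++ l by simp,
        show pre.length + 1 = (pre ++ [x]).length by simp, List.drop_left]
    have hstep : aStep (pre ++ x :: l) cnt (pre.length : Int)
        = if Validate (pre ++ l) then cnt + 1 else cnt := by
      unfold aStep; rw [htmp]
    have hbounds : ((pre.length : Int) + 1) = (((pre ++ [x]).length : Nat) : Int) := by
      simp
    have hub : (pre.length : Int) + ((x :: l).length : Int)
        = (((pre ++ [x]).length : Nat) : Int) + (l.length : Int) := by
      simp; ring
    have hlist : pre ++ x :: l = (pre ++ [x]) ++ l := by simp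
    rw [hstep, hbounds, hub, hlist, ih (pre ++ [x])]
    have hpar : ((pre ++ [x]).length) % 2 = 0 ↔ ¬ pre.length % 2 = 0 := by
      simp; omega
    have heopx := eo_append pre [x]
    have heopl := eo_append pre l
    by_cases h : pre.length % 2 = 0
    · have hm : (pre.length + 1) % 2 = 1 := by omega
      simp [h, go, validate_eq, heopl, heopx, eo, hm]
      (try split_ifs with h1) <;> first | rw [add_assoc] | norm_num
    · have hm : (pre.length + 1) % 2 = 0 := by omega
      simp [h, go, validate_eq, heopl, heopx, eo, hm]
      (try split_ifs with h1) <;> first | rw [add_assoc] | norm_num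

lemma B_loop (l : List Int) : ∀ (s pe po cnt : Int),
    ((PySem.List.enumerate l s).foldl bStep
      (pe, po, (if s % 2 = 0 then (eo l).1 else (eo l).2),
       (if s % 2 = 0 then (eo l).2 else (eo l).1), cnt)).2.2.2.2
    = cnt + go l pe po (decide (s % 2 = 0)) := by
  induction l with
  | nil => intro s pe po cnt; simp [PySem.List.enumerate_nil, go]
  | cons x l ih =>
    intro s pe po cnt
    rw [PySem.List.enumerate_cons, List.foldl_cons]
    by_cases h : s % 2 = 0
    · have hm : ¬ (s + 1) % 2 = 0 := by omega
      have ihx := ih (s + 1) (pe + x) po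
        (if pe + (eo l).1 = po + (eo l).2 then cnt + 1 else cnt)
      simp [hm] at ihx
      simp only [bStep, pmod, h, eo, if_pos, beq_iff_eq, add_sub_cancel_left, decide_true]
      rw [ihx]
      simp only [go, if_true]
      split_ifs with h1 <;> ring
    · have hm : (s + 1) % 2 = 0 := by omega
      have ihx := ih (s + 1) pe (po + x)
        (if pe + (eo l).2 = po + (eo l).1 then cnt + 1 else cnt)
      simp [hm] at ihx
      simp only [bStep, pmod, h, eo, beq_iff_eq, add_sub_cancel_left, if_false, decide_false]
      rw [ihx]
      simp only [go]
      split_ifs with h1 <;> first | exact (‹False›).elim | ring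

lemma A_eq_go (nums : List Int) : LeetCode1664 nums = go nums 0 0 true := by
  have h := A_loop nums [] 0
  simp [eo] at h
  unfold LeetCode1664
  simpa using h

lemma B_eq_go (nums : List Int) : LeetCode1664_alt nums = go nums 0 0 true := by
  unfold LeetCode1664_alt
  rw [tot_loop]
  have h := B_loop nums 0 0 0 0
  simp at h ⊢
  rw [h]

-- ===== VERDICT (by name: the statement is the Claim_ definition above) =====
theorem LeetCode1664_spec : Claim_equal_LeetCode1664 := by
  intro nums _
  unfold Spec_LeetCode1664
  rw [A_eq_go, B_eq_go]
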